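-- pv_equiv track=rewrite | github.com/mwermelinger/algorithmic-problems | advent of code/2021/day10.py | part1
-- ===== SOURCE A (Python) =====
-- def part1(data):
--     """Add the value of the first invalid bracket in each line."""
--
--     def wrong(line):
--         """Return the first wrong closing bracket."""
--         open = []   # stack of currently open brackets
--         opened = {']': '[', ')': '(', '}': '{', '>': '<'}
--         for bracket in line:
--             if bracket in '([{<':
--                 open.append(bracket)
--             elif open and opened[bracket] == open[-1]:
--                 open.pop()
--             else:
--                 return bracket
--         return ''   # no invalid closing bracket
--
--     value = {'': 0, ')': 3, ']': 57, '}': 1197, '>': 25137}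
--     return sum(value[wrong(line)] for line in data.splitlines())
-- ===== SOURCE B (Python) =====
-- def part1(data):
--     """Add the value of the first invalid bracket in each line."""
--
--     def wrong(line):
--         """Collapse matched adjacent pairs until stable; first closer left is the culprit."""
--         prev = None
--         while line != prev:
--             prev = line
--             for pair in ('()', '[]', '{}', '<>'):
--                 line = line.replace(pair, '')
--         for ch in line:
--             if ch in ')]}>':
--                 return ch
--         return ''
--
--     value = {'': 0, ')': 3, ']': 57, '}': 1197, '>': 25137}
--     return sum(value[wrong(line)] for line in data.splitlines())
-- ===== Notes on version B (the rewrite author's own statement) =====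
-- stated objective: simpler
-- what changed: wrong() no longer maintains an explicit stack: it repeatedly deletes every adjacent matched open-close bracket pair via str.replace until the line is stable, then returns the first closing bracket left in the reduced line.
-- outside the precondition, e.g. on part1(']x'): A returns 57, B returns 57
import Mathlib
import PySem

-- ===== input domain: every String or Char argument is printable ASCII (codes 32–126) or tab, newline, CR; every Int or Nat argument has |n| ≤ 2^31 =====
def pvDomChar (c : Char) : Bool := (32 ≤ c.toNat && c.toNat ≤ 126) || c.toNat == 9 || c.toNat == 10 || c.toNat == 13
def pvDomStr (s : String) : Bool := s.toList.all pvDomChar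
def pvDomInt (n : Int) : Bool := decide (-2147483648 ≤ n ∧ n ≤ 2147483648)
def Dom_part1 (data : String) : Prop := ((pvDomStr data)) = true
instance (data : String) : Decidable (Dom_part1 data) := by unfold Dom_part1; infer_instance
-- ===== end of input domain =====

-- B replaces A's explicit bracket stack by repeatedly deleting every adjacent matched
-- open-close bracket pair until the line is stable, then returning the first closing bracket
-- left (objective: simpler; not faster).

-- ===== PORT A =====
-- opened = {']': '[', ')': '(', '}': '{', '>': '<'}
def pvOpened (c : Char) : Option Char :=
  if c = ']' then some '[' else if c = ')' then some '('
  else if c = '}' then some '{' else if c = '>' then some '<' else none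

-- value = {'': 0, ')': 3, ']': 57, '}': 1197, '>': 25137} ('' is `none`;
-- a missing key would raise KeyError in Python — such inputs are excluded by Pre_part1)
def pvValueA (w : Option Char) : Int :=
  if w = none then 0 else if w = some ')' then 3 else if w = some ']' then 57
  else if w = some '}' then 1197 else if w = some '>' then 25137 else 0

-- wrong(line): the for-loop over line with the stack `open`; `none` is Python's ''
def pvWrongA (stack : List Char) : List Char → Option Char
  | [] => none
  | b :: rest =>
    if b ∈ ['(', '[', '{', '<'] then pvWrongA (b :: stack) rest
    else
      match stack with
      | top :: s' => if pvOpened b = some top then pvWrongA s' rest else some b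
      | [] => some b

def part1 (data : String) : Int :=
  ((PySem.Chars.splitlines data.toList).map (fun line => pvValueA (pvWrongA [] line))).sum

-- ===== PORT B =====
-- structural model of `line.replace(o ++ c, '')` used only to justify termination / proofs
def replPair (o c : Char) : List Char → List Char
  | [] => []
  | [x] => [x]
  | x :: y :: t => if x = o ∧ y = c then replPair o c t else x :: replPair o c (y :: t)

theorem replace_go_eq_replPair (o c : Char) :
    ∀ (fuel : Nat) (l acc : List Char), l.length ≤ fuel →
      PySem.Chars.replace.go [o, c] [] fuel l acc = acc.reverse ++ replPair o c l := by
  intro fuel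
  induction fuel with
  | zero =>
    intro l acc h
    have : l = [] := List.eq_nil_of_length_eq_zero (Nat.le_zero.mp h)
    subst this; simp [PySem.Chars.replace.go, replPair]
  | succ n ih =>
    intro l acc h
    match l with
    | [] => simp [PySem.Chars.replace.go, replPair]
    | x :: t =>
      rw [PySem.Chars.replace.go]
      by_cases hp : List.isPrefixOf [o, c] (x :: t) = true
      · rw [if_pos hp]
        match t, hp with
        | [], hp => simp [List.isPrefixOf] at hp
        | y :: t', hp =>
          have hx : o = x ∧ c = y := by
            simpa [List.isPrefixOf] using hp
          obtain ⟨hx1, hx2⟩ := hx; subst hx1; subst hx2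
          have hlen : t'.length ≤ n := by
            simp only [List.length_cons] at h; omega
          rw [show List.drop [o, c].length (o :: c :: t') = t' by simp]
          rw [ih t' _ hlen]
          simp [replPair]
      · rw [if_neg hp]
        rw [ih t (x :: acc) (by simpa using Nat.le_of_succ_le_succ h)]
        have hne : ¬ (x = o ∧ (∃ y t', t = y :: t' ∧ y = c)) := by
          rintro ⟨hx, y, t', ht, hy⟩
          subst hx; subst ht; subst hy
          exact hp (by simp [List.isPrefixOf])
        match t with
        | [] => simp [replPair]
        | y :: t' =>
          have : ¬ (x = o ∧ y = c) := by
            rintro ⟨h1, h2⟩; exact hne ⟨h1, y, t', rfl, h2⟩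
          simp [replPair, this]

theorem replace_eq_replPair (o c : Char) (l : List Char) :
    PySem.Chars.replace l [o, c] [] = replPair o c l := by
  rw [PySem.Chars.replace]
  simp only [List.isEmpty_cons]
  exact replace_go_eq_replPair o c l.length l [] le_rfl

theorem replPair_length_le (o c : Char) : ∀ l : List Char, (replPair o c l).length ≤ l.length := by
  intro l
  induction l using replPair.induct o c with
  | case1 => simp [replPair]
  | case2 => simp [replPair]
  | case3 x y t h ih => simp only [replPair, if_pos h]; simp at ih ⊢; omega
  | case4 x y t h ih => simp only [replPair, if_neg h]; simpa using Nat.succ_le_succ ih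

theorem replPair_eq_or_lt (o c : Char) :
    ∀ l : List Char, replPair o c l = l ∨ (replPair o c l).length < l.length := by
  intro l
  induction l using replPair.induct o c with
  | case1 => left; rfl
  | case2 => left; rfl
  | case3 x y t h ih =>
    right
    have := replPair_length_le o c t
    simp only [replPair, if_pos h]
    simp; omega
  | case4 x y t h ih =>
    rcases ih with heq | hlt
    · left; simp [replPair, if_neg h, heq]
    · right; simp only [replPair, if_neg h]; simpa using Nat.succ_lt_succ hlt

-- one pass of the while-loop body: the four str.replace calls in order
def pvReduceOnce (l : List Char) : List Char :=
  PySem.Chars.replace (PySem.Chars.replace (PySem.Chars.replace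
    (PySem.Chars.replace l ['(', ')'] []) ['[', ']'] []) ['{', '}'] []) ['<', '>'] []

theorem reduceOnce_length_le (l : List Char) : (pvReduceOnce l).length ≤ l.length := by
  unfold pvReduceOnce
  simp only [replace_eq_replPair]
  calc (replPair '<' '>' (replPair '{' '}' (replPair '[' ']' (replPair '(' ')' l)))).length
      ≤ (replPair '{' '}' (replPair '[' ']' (replPair '(' ')' l))).length := replPair_length_le _ _ _
    _ ≤ (replPair '[' ']' (replPair '(' ')' l)).length := replPair_length_le _ _ _
    _ ≤ (replPair '(' ')' l).length := replPair_length_le _ _ _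
    _ ≤ l.length := replPair_length_le _ _ _

theorem reduceOnce_ne_length_lt (l : List Char) (h : pvReduceOnce l ≠ l) :
    (pvReduceOnce l).length < l.length := by
  rcases Nat.lt_or_ge (pvReduceOnce l).length l.length with hlt | hge
  · exact hlt
  · exfalso
    have hle := reduceOnce_length_le l
    have hlen : (pvReduceOnce l).length = l.length := Nat.le_antisymm hle hge
    unfold pvReduceOnce at hlen h
    simp only [replace_eq_replPair] at hlen h
    have h1 := replPair_length_le '(' ')' l
    have h2 := replPair_length_le '[' ']' (replPair '(' ')' l)
    have h3 := replPair_length_le '{' '}' (replPair '[' ']' (replPair '(' ')' l))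
    have h4 := replPair_length_le '<' '>' (replPair '{' '}' (replPair '[' ']' (replPair '(' ')' l)))
    have e1 : replPair '(' ')' l = l := by
      rcases replPair_eq_or_lt '(' ')' l with he | hl; · exact he
      · omega
    rw [e1] at hlen h h2 h3 h4
    have e2 : replPair '[' ']' l = l := by
      rcases replPair_eq_or_lt '[' ']' l with he | hl; · exact he
      · omega
    rw [e2] at hlen h h3 h4
    have e3 : replPair '{' '}' l = l := by
      rcases replPair_eq_or_lt '{' '}' l with he | hl; · exact he
      · omega
    rw [e3] at hlen h h4
    have e4 : replPair '<' '>' l = l := by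
      rcases replPair_eq_or_lt '<' '>' l with he | hl; · exact he
      · omega
    exact h (by rw [e4])

-- the while-loop: keep replacing until the line no longer changes
def pvReduce (l : List Char) : List Char :=
  let l' := pvReduceOnce l
  if l' = l then l else pvReduce l'
termination_by l.length
decreasing_by exact reduceOnce_ne_length_lt l (by assumption)

-- the final for-loop: first character in ')]}>' (none is Python's '')
def pvScanB : List Char → Option Char
  | [] => none
  | ch :: rest => if ch ∈ [')', ']', '}', '>'] then some ch else pvScanB rest

-- value = {'': 0, ')': 3, ']': 57, '}': 1197, '>': 25137} (B's own copy)
def pvValueB (w : Option Char) : Int :=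
  match w with
  | none => 0
  | some ')' => 3
  | some ']' => 57
  | some '}' => 1197
  | some '>' => 25137
  | some _ => 0

def part1_alt (data : String) : Int :=
  ((PySem.Chars.splitlines data.toList).map (fun line => pvValueB (pvScanB (pvReduce line)))).sum

-- ===== PRECONDITION & SPEC =====
-- Pre_part1 excludes lines containing non-bracket characters: on almost all of those A raises
-- KeyError (opened[ch] or value[wrong(line)]); on the few where junk only follows the first
-- corrupt closing bracket A still returns, and B agrees there, but A's acceptance is accidental.
def Pre_part1 (data : String) : Prop :=
  ((PySem.Chars.splitlines data.toList).all
    (fun line => line.all (fun c => decide (c ∈ ['(', ')', '[', ']', '{', '}', '<', '>'])))) = true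
instance (data : String) : Decidable (Pre_part1 data) := by unfold Pre_part1; infer_instance

def pvWitness_part1 : String := "(]\n<>{"

def Spec_part1 (data : String) (out : Int) : Prop := out = part1_alt data
instance (data : String) (out : Int) : Decidable (Spec_part1 data out) := by
  unfold Spec_part1; infer_instance

-- ===== CLAIM (what is proved, stated in full; the proofs are below) =====
def Claim_equal_part1 : Prop :=
  ∀ (data : String), Dom_part1 data → Pre_part1 data → Spec_part1 data (part1 data)

-- ===== LEMMAS AND PROOFS =====

-- the canonical cancellation stack: push, except pop a matching open under a closer
def stepC (s : List Char) (c : Char) : List Char :=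
  match s with
  | top :: r => if pvOpened c = some top then r else c :: s
  | [] => [c]

theorem pvOpened_of_open (x : Char) (hx : x ∈ ['(', '[', '{', '<']) : pvOpened x = none := by
  fin_cases hx <;> rfl

theorem stepC_open (s : List Char) (x : Char) (hx : pvOpened x = none) : stepC s x = x :: s := by
  cases s with
  | nil => rfl
  | cons t r => simp [stepC, hx]

theorem pvOpened_mem (a o : Char) (h : pvOpened a = some o) : o ∈ ['(', '[', '{', '<'] := by
  unfold pvOpened at h
  split_ifs at h <;> simp at h <;> subst h <;> simp

-- deleting all adjacent (o,c) pairs does not change the cancellation stack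
theorem foldl_replPair (o c : Char) (hoc : pvOpened c = some o) (hno : pvOpened o = none) :
    ∀ (l s : List Char), (replPair o c l).foldl stepC s = l.foldl stepC s := by
  intro l
  induction l using replPair.induct o c with
  | case1 => intro s; rfl
  | case2 => intro s; rfl
  | case3 x y t h ih =>
    intro s
    simp only [replPair, if_pos h]
    rw [ih]
    obtain ⟨hx, hy⟩ := h; subst hx; subst hy
    have e1 : stepC s x = x :: s := stepC_open s x hno
    have e2 : stepC (x :: s) y = s := by simp [stepC, hoc]
    rw [List.foldl_cons, List.foldl_cons, e1, e2]
  | case4 x y t h ih =>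
    intro s
    simp only [replPair, if_neg h, List.foldl]
    exact ih (stepC s x)

theorem foldl_reduceOnce (l s : List Char) :
    (pvReduceOnce l).foldl stepC s = l.foldl stepC s := by
  unfold pvReduceOnce
  simp only [replace_eq_replPair]
  rw [foldl_replPair '<' '>' rfl rfl, foldl_replPair '{' '}' rfl rfl,
      foldl_replPair '[' ']' rfl rfl, foldl_replPair '(' ')' rfl rfl]

theorem foldl_reduce (l s : List Char) : (pvReduce l).foldl stepC s = l.foldl stepC s := by
  fun_induction pvReduce l with
  | case1 x l' h => rfl
  | case2 x l' h ih => rw [ih]; exact foldl_reduceOnce x s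

theorem reduceOnce_fix (l : List Char) : pvReduceOnce (pvReduce l) = pvReduce l := by
  fun_induction pvReduce l with
  | case1 x l' h => exact h
  | case2 x l' h ih => exact ih

-- irreducibility: no adjacent matched pair occurs
def Irred (l : List Char) : Prop := ∀ o c, pvOpened c = some o → ¬ [o, c] <:+: l

theorem replPair_infix_lt (o c : Char) :
    ∀ l : List Char, [o, c] <:+: l → (replPair o c l).length < l.length := by
  intro l
  induction l using replPair.induct o c with
  | case1 => intro h; exact absurd (List.eq_nil_of_infix_nil h) (by simp)
  | case2 x =>
    intro h
    have := h.length_le; simp at this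
  | case3 x y t h ih =>
    intro _
    have := replPair_length_le o c t
    simp only [replPair, if_pos h]; simp; omega
  | case4 x y t h ih =>
    intro hinf
    rcases List.infix_cons_iff.mp hinf with hp | hinf'
    · exfalso
      rcases hp with ⟨u, hu⟩
      apply h
      have : o = x ∧ c = y := by
        cases hu; exact ⟨rfl, rfl⟩
      exact ⟨this.1.symm, this.2.symm⟩
    · have := ih hinf'
      simp only [replPair, if_neg h]; simpa using Nat.succ_lt_succ this

theorem fix_not_infix (o c : Char) (l : List Char) (h : replPair o c l = l) :
    ¬ [o, c] <:+: l := by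
  intro hinf
  have := replPair_infix_lt o c l hinf
  rw [h] at this
  omega

theorem reduce_irred (l : List Char) : Irred (pvReduce l) := by
  intro o c hoc
  have hfix := reduceOnce_fix l
  set r := pvReduce l with hr
  unfold pvReduceOnce at hfix
  simp only [replace_eq_replPair] at hfix
  have h1 := replPair_length_le '(' ')' r
  have h2 := replPair_length_le '[' ']' (replPair '(' ')' r)
  have h3 := replPair_length_le '{' '}' (replPair '[' ']' (replPair '(' ')' r))
  have hlen : (replPair '<' '>' (replPair '{' '}' (replPair '[' ']' (replPair '(' ')' r)))).length
      = r.length := by rw [hfix]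
  have e1 : replPair '(' ')' r = r := by
    rcases replPair_eq_or_lt '(' ')' r with he | hl; · exact he
    · exfalso
      have := replPair_length_le '<' '>' (replPair '{' '}' (replPair '[' ']' (replPair '(' ')' r)))
      omega
  rw [e1] at hfix h2 h3 hlen
  have e2 : replPair '[' ']' r = r := by
    rcases replPair_eq_or_lt '[' ']' r with he | hl; · exact he
    · exfalso
      have := replPair_length_le '<' '>' (replPair '{' '}' (replPair '[' ']' r))
      omega
  rw [e2] at hfix h3 hlen
  have e3 : replPair '{' '}' r = r := by
    rcases replPair_eq_or_lt '{' '}' r with he | hl; · exact he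
    · exfalso
      have := replPair_length_le '<' '>' (replPair '{' '}' r)
      omega
  rw [e3] at hfix hlen
  have e4 : replPair '<' '>' r = r := hfix
  have hcases : (o = '(' ∧ c = ')') ∨ (o = '[' ∧ c = ']') ∨ (o = '{' ∧ c = '}') ∨ (o = '<' ∧ c = '>') := by
    unfold pvOpened at hoc
    split_ifs at hoc <;> simp_all <;> tauto
  rcases hcases with ⟨h1', h2'⟩ | ⟨h1', h2'⟩ | ⟨h1', h2'⟩ | ⟨h1', h2'⟩ <;> subst h1' <;> subst h2'
  · exact fix_not_infix _ _ r e1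
  · exact fix_not_infix _ _ r e2
  · exact fix_not_infix _ _ r e3
  · exact fix_not_infix _ _ r e4

theorem irred_foldl :
    ∀ (l : List Char), Irred l →
      ∀ s, (∀ o c, s.head? = some o → l.head? = some c → pvOpened c ≠ some o) →
        l.foldl stepC s = l.reverse ++ s := by
  intro l
  induction l with
  | nil => intro _ s _; simp
  | cons c rest ih =>
    intro hirr s hs
    have hstep : stepC s c = c :: s := by
      cases s with
      | nil => rfl
      | cons t r =>
        have := hs t c rfl rfl
        simp [stepC, this]
    simp only [List.foldl, hstep]
    rw [ih (fun o c' hoc => fun hinf => hirr o c' hoc (List.infix_cons hinf))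
        (c :: s) ?_]
    · simp
    · intro o c' ho hc' hoc
      have ho' : c = o := by simpa using ho
      subst ho'
      cases rest with
      | nil => simp at hc'
      | cons c2 r2 =>
        have hc2 : c2 = c' := by simpa using hc'
        subst hc2
        exact hirr c c2 hoc ⟨[], r2, by simp⟩

theorem reduce_eq_reverse_foldl (l : List Char) :
    pvReduce l = (l.foldl stepC []).reverse := by
  have h1 := foldl_reduce l []
  have h2 := irred_foldl (pvReduce l) (reduce_irred l) [] (by intro o c h; simp at h)
  rw [h2] at h1
  simp at h1
  rw [← h1, List.reverse_reverse]

theorem pvOpened_ne_closer (c a : Char) (hc : c ∈ [')', ']', '}', '>']) :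
    pvOpened a ≠ some c := by
  intro h
  have := pvOpened_mem a c h
  fin_cases hc <;> simp_all

theorem scan_append_skip (xs ys : List Char) (hxs : ∀ x ∈ xs, x ∉ [')', ']', '}', '>']) :
    pvScanB (xs ++ ys) = pvScanB ys := by
  induction xs with
  | nil => rfl
  | cons x t ih =>
    have hx := hxs x (by simp)
    simp only [List.cons_append, pvScanB, if_neg hx]
    exact ih (fun x hx => hxs x (by simp [hx]))

theorem scan_opens (s : List Char) (hs : ∀ x ∈ s, x ∈ ['(', '[', '{', '<']) :
    pvScanB s.reverse = none := by
  have : pvScanB (s.reverse ++ []) = pvScanB [] := by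
    apply scan_append_skip
    intro x hx
    have := hs x (by simpa using hx)
    fin_cases this <;> simp
  simpa using this

-- a closer once pushed on the cancellation stack is never popped
theorem closer_persists (c : Char) (hc : ∀ a, pvOpened a ≠ some c) :
    ∀ (cs u s : List Char), ∃ v, cs.foldl stepC (u ++ c :: s) = v ++ c :: s := by
  intro cs
  induction cs with
  | nil => intro u s; exact ⟨u, rfl⟩
  | cons a rest ih =>
    intro u s
    simp only [List.foldl]
    cases u with
    | nil =>
      have : stepC ([] ++ c :: s) a = [a] ++ c :: s := by
        simp [stepC, hc a]
      rw [this]; exact ih [a] s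
    | cons t u' =>
      by_cases hpop : pvOpened a = some t
      · have : stepC ((t :: u') ++ c :: s) a = u' ++ c :: s := by simp [stepC, hpop]
        rw [this]; exact ih u' s
      · have : stepC ((t :: u') ++ c :: s) a = (a :: t :: u') ++ c :: s := by simp [stepC, hpop]
        rw [this]; exact ih (a :: t :: u') s

-- the main per-line bridge: scanning the cancelled remainder equals A's stack machine
theorem wrongA_eq_scan_foldl :
    ∀ (l s : List Char), (∀ x ∈ s, x ∈ ['(', '[', '{', '<']) →
      (∀ x ∈ l, x ∈ ['(', ')', '[', ']', '{', '}', '<', '>']) →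
      pvScanB ((l.foldl stepC s).reverse) = pvWrongA s l := by
  intro l
  induction l with
  | nil =>
    intro s hs _
    simp only [List.foldl, pvWrongA]
    exact scan_opens s hs
  | cons b rest ih =>
    intro s hs hl
    have hb := hl b (by simp)
    by_cases hopen : b ∈ ['(', '[', '{', '<']
    · have hbo := pvOpened_of_open b hopen
      simp only [pvWrongA, if_pos hopen, List.foldl, stepC_open s b hbo]
      exact ih (b :: s) (fun x hx => (List.mem_cons.mp hx).elim (fun h => h ▸ hopen) (hs x))
        (fun x hx => hl x (by simp [hx]))
    · have hbclose : b ∈ [')', ']', '}', '>'] := by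
        fin_cases hb <;> simp_all
      simp only [pvWrongA, if_neg hopen]
      cases s with
      | nil =>
        have hstep : stepC [] b = [b] := rfl
        simp only [List.foldl, hstep]
        obtain ⟨v, hv⟩ := closer_persists b (fun a => pvOpened_ne_closer b a hbclose) rest [] []
        rw [show ([b] : List Char) = [] ++ b :: [] by rfl, hv]
        rw [List.reverse_append]
        simp [pvScanB, hbclose]
      | cons top s' =>
        by_cases hpop : pvOpened b = some top
        · have hstep : stepC (top :: s') b = s' := by simp [stepC, hpop]
          simp only [List.foldl, hstep, if_pos hpop]
          exact ih s' (fun x hx => hs x (by simp [hx])) (fun x hx => hl x (by simp [hx]))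
        · have hstep : stepC (top :: s') b = b :: top :: s' := by simp [stepC, hpop]
          simp only [List.foldl, hstep, if_neg hpop]
          obtain ⟨v, hv⟩ := closer_persists b (fun a => pvOpened_ne_closer b a hbclose) rest [] (top :: s')
          rw [show b :: top :: s' = [] ++ b :: (top :: s') by rfl, hv]
          rw [List.reverse_append]
          rw [show ((b :: top :: s').reverse : List Char) = (top :: s').reverse ++ [b] by simp]
          rw [List.append_assoc]
          rw [scan_append_skip ((top :: s').reverse) _ ?_]
          · simp [pvScanB, hbclose]
          · intro x hx
            have hxmem : x ∈ top :: s' := List.mem_reverse.mp hx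
            have := hs x hxmem
            fin_cases this <;> simp

theorem perline (line : List Char)
    (hl : ∀ c ∈ line, c ∈ ['(', ')', '[', ']', '{', '}', '<', '>']) :
    pvValueA (pvWrongA [] line) = pvValueB (pvScanB (pvReduce line)) := by
  rw [reduce_eq_reverse_foldl]
  rw [wrongA_eq_scan_foldl line [] (by simp) hl]
  rcases h : pvWrongA [] line with _ | w <;> simp [pvValueA, pvValueB]
  rcases eq_or_ne w ')' with h1 | h1; · simp [h1]
  rcases eq_or_ne w ']' with h2 | h2; · simp [h2]
  rcases eq_or_ne w '}' with h3 | h3; · simp [h3]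
  rcases eq_or_ne w '>' with h4 | h4; · simp [h4]
  simp [h1, h2, h3, h4]

-- ===== VERDICT (by name: the statement is the Claim_ definition above) =====
theorem part1_spec : Claim_equal_part1 := by
  intro data _ hpre
  unfold Pre_part1 at hpre
  simp only [List.all_eq_true, decide_eq_true_eq] at hpre
  unfold Spec_part1 part1 part1_alt
  congr 1
  apply List.map_congr_left
  intro line hline
  exact perline line (hpre line hline)
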